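-- pv_equiv track=rewrite | github.com/eholdmore/telomere_analysis_pipeline | collect_paths.py | select_mutect_file
-- ===== SOURCE A (Python) =====
-- def select_mutect_file(files):
--     """Prefer somatic_output / final_snvindels over MNV or paired files."""
--     if not files:
--         return None
--     priority_keywords = ["somatic_output.tsv", "final_snvindels.tsv", "snv_indel.tsv"]
--     for kw in priority_keywords:
--         match = [f for f in files if kw in f.lower()]
--         if match:
--             return match[0]
--     non_mnv = [f for f in files if "mnv" not in f.lower()]
--     return non_mnv[0] if non_mnv else files[0]
-- ===== SOURCE B (Python) =====
-- def select_mutect_file(files):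
--     """Prefer somatic_output / final_snvindels over MNV or paired files.
--
--     Single pass: track the file with the lowest-priority-index keyword and
--     the first non-mnv fallback.
--     """
--     if not files:
--         return None
--     kws = ["somatic_output.tsv", "final_snvindels.tsv", "snv_indel.tsv"]
--     best_rank, best, fallback = 3, None, None
--     for f in files:
--         low = f.lower()
--         r = 0
--         while r < 3 and kws[r] not in low:
--             r += 1
--         if r < best_rank:
--             best_rank, best = r, f
--         if fallback is None and "mnv" not in low:
--             fallback = f
--     if best is not None:
--         return best
--     if fallback is not None:
--         return fallback
--     return files[0]
-- ===== Notes on version B (the rewrite author's own statement) =====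
-- stated objective: alternative
-- what changed: Replaces A's three separate keyword-filter passes plus a non-mnv filter pass by a single pass over files that maintains the best (lowest keyword-priority-index) file and the first non-mnv fallback.
import Mathlib
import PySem

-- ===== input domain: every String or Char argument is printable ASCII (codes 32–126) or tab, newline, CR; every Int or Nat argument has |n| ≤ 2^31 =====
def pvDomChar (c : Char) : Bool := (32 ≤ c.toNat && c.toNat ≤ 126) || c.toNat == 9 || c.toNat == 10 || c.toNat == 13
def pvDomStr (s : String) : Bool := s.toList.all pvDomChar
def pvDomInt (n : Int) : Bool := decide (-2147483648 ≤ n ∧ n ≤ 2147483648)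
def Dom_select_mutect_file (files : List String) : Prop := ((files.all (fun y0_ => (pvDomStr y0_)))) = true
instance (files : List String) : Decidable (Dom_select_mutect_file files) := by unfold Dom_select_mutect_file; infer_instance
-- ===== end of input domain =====

-- B replaces A's four successive filtering passes over the file list by one pass that
-- tracks the best-priority file and the first non-mnv fallback (alternative decomposition).

-- ===== PORT A =====
-- the 'for kw in priority_keywords' loop: returns the first filter hit
def smfLoopA (files : List String) : List String → Option String
  | [] => none
  | kw :: rest =>
    match files.filter (fun f => PySem.Str.isIn kw (PySem.Str.lower f)) with
    | f :: _ => some f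
    | [] => smfLoopA files rest

def select_mutect_file (files : List String) : Option String :=
  if files.isEmpty then none
  else
    match smfLoopA files ["somatic_output.tsv", "final_snvindels.tsv", "snv_indel.tsv"] with
    | some f => some f
    | none =>
      match files.filter (fun f => !(PySem.Str.isIn "mnv" (PySem.Str.lower f))) with
      | f :: _ => some f
      | [] => files.head?

-- ===== PORT B =====
-- index of the first keyword contained in low (list length if none)
def smfRank : List String → String → Nat
  | [], _ => 0
  | kw :: rest, low => if PySem.Str.isIn kw low then 0 else 1 + smfRank rest low

-- one loop iteration: update (best_rank, best, fallback) with file f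
def smfStep (st : Nat × Option String × Option String) (f : String) : Nat × Option String × Option String :=
  let low := PySem.Str.lower f
  let r := smfRank ["somatic_output.tsv", "final_snvindels.tsv", "snv_indel.tsv"] low
  let st1 := if r < st.1 then (r, some f, st.2.2) else st
  match st1.2.2 with
  | some _ => st1
  | none => if PySem.Str.isIn "mnv" low then st1 else (st1.1, st1.2.1, some f)

def select_mutect_file_alt (files : List String) : Option String :=
  if files.isEmpty then none
  else
    let st := files.foldl smfStep (3, none, none)
    match st.2.1 with
    | some b => some b
    | none =>
      match st.2.2 with
      | some fb => some fb
      | none => files.head?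

-- ===== PRECONDITION & SPEC =====
def Spec_select_mutect_file (files : List String) (out : Option String) : Prop := out = select_mutect_file_alt files
instance (files : List String) (out : Option String) : Decidable (Spec_select_mutect_file files out) := by unfold Spec_select_mutect_file; infer_instance

-- ===== CLAIM (what is proved, stated in full; the proofs are below) =====
def Claim_equal_select_mutect_file : Prop := ∀ (files : List String), Dom_select_mutect_file files → Spec_select_mutect_file files (select_mutect_file files)

-- ===== LEMMAS AND PROOFS =====

-- proof-side abbreviations
def smfR (f : String) : Nat :=
  smfRank ["somatic_output.tsv", "final_snvindels.tsv", "snv_indel.tsv"] (PySem.Str.lower f)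

def mnvOk (f : String) : Bool := !(PySem.Str.isIn "mnv" (PySem.Str.lower f))

def bstep (p : Nat × Option String) (f : String) : Nat × Option String :=
  if smfR f < p.1 then (smfR f, some f) else p

def mfold (b : Nat) (l : List String) : Nat :=
  l.foldl (fun a f => if smfR f < a then smfR f else a) b

lemma mfold_le (l : List String) : ∀ b, mfold b l ≤ b := by
  induction l with
  | nil => intro b; simp [mfold]
  | cons f t ih =>
    intro b
    simp only [mfold, List.foldl_cons] at *
    split_ifs with h
    · exact le_trans (ih _) (by omega)
    · exact ih b

lemma mfold_le_of_mem (l : List String) : ∀ b, ∀ f ∈ l, mfold b l ≤ smfR f := by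
  induction l with
  | nil => intro _ f hf; simp at hf
  | cons g t ih =>
    intro b f hf
    simp only [mfold, List.foldl_cons]
    rcases List.mem_cons.mp hf with rfl | hf
    · split_ifs with h
      · exact mfold_le t _
      · exact le_trans (mfold_le t b) (by omega)
    · split_ifs with h <;> exact ih _ f hf

lemma le_mfold (l : List String) : ∀ b c, (∀ f ∈ l, c ≤ smfR f) → c ≤ b → c ≤ mfold b l := by
  induction l with
  | nil => intro b c _ hb; simpa [mfold]
  | cons g t ih =>
    intro b c h hb
    simp only [mfold, List.foldl_cons]
    split_ifs with hg
    · exact ih _ c (fun f hf => h f (List.mem_cons_of_mem _ hf)) (h g (List.mem_cons_self ..))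
    · exact ih b c (fun f hf => h f (List.mem_cons_of_mem _ hf)) hb

lemma find?_congr_mem (l : List String) (p q : String → Bool) (h : ∀ x ∈ l, p x = q x) :
    l.find? p = l.find? q := by
  induction l with
  | nil => rfl
  | cons g t ih =>
    simp only [List.find?_cons]
    rw [h g (List.mem_cons_self ..)]
    split
    · rfl
    · exact ih (fun x hx => h x (List.mem_cons_of_mem _ hx))

lemma head?_filter (p : String → Bool) (l : List String) : (l.filter p).head? = l.find? p := by
  induction l with
  | nil => rfl
  | cons g t ih =>
    simp only [List.filter_cons, List.find?_cons]
    cases h : p g <;> simp [h, ih]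

-- the fallback component of the fold is the first non-mnv file
lemma fb_foldl (l : List String) : ∀ st : Nat × Option String × Option String,
    (l.foldl smfStep st).2.2 =
      match st.2.2 with
      | some x => some x
      | none => l.find? mnvOk := by
  induction l with
  | nil => intro st; cases h : st.2.2 <;> simp [h]
  | cons f t ih =>
    intro st
    have hstep : (smfStep st f).2.2 =
        match st.2.2 with
        | some x => some x
        | none => if mnvOk f then some f else none := by
      simp only [smfStep, mnvOk]
      cases h : st.2.2 <;> split_ifs <;> simp_all
    rw [List.foldl_cons, ih]
    rw [hstep]
    cases h : st.2.2 with
    | some x => simp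
    | none =>
      by_cases hm : mnvOk f <;> simp [hm]

-- the (best_rank, best) components of the fold only depend on (best_rank, best)
lemma proj12 (l : List String) : ∀ st : Nat × Option String × Option String,
    ((l.foldl smfStep st).1, (l.foldl smfStep st).2.1) = l.foldl bstep (st.1, st.2.1) := by
  induction l with
  | nil => intro st; rfl
  | cons f t ih =>
    intro st
    rw [List.foldl_cons, List.foldl_cons, ih]
    congr 1
    simp only [smfStep, bstep, smfR]
    cases h : st.2.2 <;> split_ifs <;> simp_all

-- characterisation of the running-minimum pair
lemma best_char (l : List String) : ∀ b bo,
    l.foldl bstep (b, bo) =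
      (mfold b l, if mfold b l < b then l.find? (fun f => smfR f == mfold b l) else bo) := by
  induction l with
  | nil => intro b bo; simp [mfold]
  | cons f t ih =>
    intro b bo
    rw [List.foldl_cons]
    simp only [bstep]
    have hm : mfold b (f :: t) = mfold (if smfR f < b then smfR f else b) t := by
      simp [mfold]
    by_cases h : smfR f < b
    · simp only [if_pos h]
      rw [ih]
      have hle := mfold_le t (smfR f)
      rw [hm, if_pos h]
      by_cases h2 : mfold (smfR f) t < smfR f
      · have hne : (smfR f == mfold (smfR f) t) = false := by
          simp; omega
        simp [h2, hne, show mfold (smfR f) t < b by omega]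
      · have heq : mfold (smfR f) t = smfR f := by omega
        simp [heq, show smfR f < b from h]
    · simp only [if_neg h]
      rw [ih]
      rw [hm, if_neg h]
      by_cases h2 : mfold b t < b
      · have hne : (smfR f == mfold b t) = false := by
          simp; omega
        simp [h2, hne]
      · simp [h2]

-- rank in terms of the three keyword tests
lemma smfR_eq (f : String) :
    smfR f = if PySem.Str.isIn "somatic_output.tsv" (PySem.Str.lower f) then 0
      else if PySem.Str.isIn "final_snvindels.tsv" (PySem.Str.lower f) then 1
      else if PySem.Str.isIn "snv_indel.tsv" (PySem.Str.lower f) then 2 else 3 := by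
  simp only [smfR, smfRank]; split_ifs <;> rfl

-- B rewritten through the characterisations
lemma alt_eq (files : List String) (hne : files ≠ []) :
    select_mutect_file_alt files =
      match (if mfold 3 files < 3 then files.find? (fun f => smfR f == mfold 3 files) else none) with
      | some b => some b
      | none =>
        match files.find? mnvOk with
        | some fb => some fb
        | none => files.head? := by
  have h1 := proj12 files ((3 : Nat), (none : Option String), (none : Option String))
  have h2 := best_char files 3 none
  have h3 := fb_foldl files ((3 : Nat), (none : Option String), (none : Option String))
  simp only [select_mutect_file_alt, if_neg (by simp [hne] : ¬ files.isEmpty = true)]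
  have e1 : (files.foldl smfStep (3, none, none)).2.1 =
      (if mfold 3 files < 3 then files.find? (fun f => smfR f == mfold 3 files) else none) := by
    have := congrArg Prod.snd h1
    simp only at this
    rw [this, h2]
  have e2 : (files.foldl smfStep (3, none, none)).2.2 = files.find? mnvOk := by
    simpa using h3
  rw [e1, e2]

theorem select_mutect_file_key (files : List String) :
    select_mutect_file files = select_mutect_file_alt files := by
  cases files with
  | nil => rfl
  | cons f0 t0 =>
    set files := f0 :: t0 with hfl
    have hne : files ≠ [] := by simp [hfl]
    rw [alt_eq files hne]
    simp only [select_mutect_file, if_neg (by simp [hfl] : ¬ files.isEmpty = true)]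
    simp only [smfLoopA]
    rcases h0 : files.filter (fun f => PySem.Str.isIn "somatic_output.tsv" (PySem.Str.lower f)) with _ | ⟨g0, r0⟩
    case cons =>
      -- some file matches the first keyword: minimum rank is 0
      have hg0 : files.find? (fun f => PySem.Str.isIn "somatic_output.tsv" (PySem.Str.lower f)) = some g0 := by
        rw [← head?_filter, h0]; rfl
      have hg0mem : g0 ∈ files := List.mem_of_find?_eq_some hg0
      have hg0r : smfR g0 = 0 := by
        rw [smfR_eq, if_pos (by simpa using List.find?_some hg0)]
      have hm : mfold 3 files = 0 := by
        have := mfold_le_of_mem files 3 g0 hg0mem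
        omega
      have hfind : files.find? (fun f => smfR f == 0) =
          files.find? (fun f => PySem.Str.isIn "somatic_output.tsv" (PySem.Str.lower f)) := by
        apply find?_congr_mem
        intro x _
        rw [smfR_eq]
        split_ifs <;> simp_all
      rw [hm, if_pos (by omega : (0:Nat) < 3), hfind, hg0]
    case nil =>
      have hall0 : ∀ x ∈ files, ¬ PySem.Str.isIn "somatic_output.tsv" (PySem.Str.lower x) = true := by
        simpa using (List.filter_eq_nil_iff.mp h0)
      rcases h1 : files.filter (fun f => PySem.Str.isIn "final_snvindels.tsv" (PySem.Str.lower f)) with _ | ⟨g1, r1⟩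
      case cons =>
        have hg1 : files.find? (fun f => PySem.Str.isIn "final_snvindels.tsv" (PySem.Str.lower f)) = some g1 := by
          rw [← head?_filter, h1]; rfl
        have hg1mem : g1 ∈ files := List.mem_of_find?_eq_some hg1
        have hg1r : smfR g1 = 1 := by
          rw [smfR_eq, if_neg (hall0 g1 hg1mem), if_pos (by simpa using List.find?_some hg1)]
        have hm : mfold 3 files = 1 := by
          have h1' := mfold_le_of_mem files 3 g1 hg1mem
          have h2' := le_mfold files 3 1 (fun x hx => by
            rw [smfR_eq, if_neg (hall0 x hx)]; split_ifs <;> omega) (by omega)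
          omega
        have hfind : files.find? (fun f => smfR f == 1) =
            files.find? (fun f => PySem.Str.isIn "final_snvindels.tsv" (PySem.Str.lower f)) := by
          apply find?_congr_mem
          intro x hx
          rw [smfR_eq, if_neg (hall0 x hx)]
          split_ifs <;> simp_all
        rw [hm, if_pos (by omega : (1:Nat) < 3), hfind, hg1]
      case nil =>
        have hall1 : ∀ x ∈ files, ¬ PySem.Str.isIn "final_snvindels.tsv" (PySem.Str.lower x) = true := by
          simpa using (List.filter_eq_nil_iff.mp h1)
        rcases h2 : files.filter (fun f => PySem.Str.isIn "snv_indel.tsv" (PySem.Str.lower f)) with _ | ⟨g2, r2⟩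
        case cons =>
          have hg2 : files.find? (fun f => PySem.Str.isIn "snv_indel.tsv" (PySem.Str.lower f)) = some g2 := by
            rw [← head?_filter, h2]; rfl
          have hg2mem : g2 ∈ files := List.mem_of_find?_eq_some hg2
          have hg2r : smfR g2 = 2 := by
            rw [smfR_eq, if_neg (hall0 g2 hg2mem), if_neg (hall1 g2 hg2mem),
              if_pos (by simpa using List.find?_some hg2)]
          have hm : mfold 3 files = 2 := by
            have h1' := mfold_le_of_mem files 3 g2 hg2mem
            have h2' := le_mfold files 3 2 (fun x hx => by
              rw [smfR_eq, if_neg (hall0 x hx), if_neg (hall1 x hx)]; split_ifs <;> omega) (by omega)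
            omega
          have hfind : files.find? (fun f => smfR f == 2) =
              files.find? (fun f => PySem.Str.isIn "snv_indel.tsv" (PySem.Str.lower f)) := by
            apply find?_congr_mem
            intro x hx
            rw [smfR_eq, if_neg (hall0 x hx), if_neg (hall1 x hx)]
            split_ifs <;> simp_all
          rw [hm, if_pos (by omega : (2:Nat) < 3), hfind, hg2]
        case nil =>
          have hall2 : ∀ x ∈ files, ¬ PySem.Str.isIn "snv_indel.tsv" (PySem.Str.lower x) = true := by
            simpa using (List.filter_eq_nil_iff.mp h2)
          have hm : mfold 3 files = 3 := by
            have h1' := mfold_le files 3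
            have h2' := le_mfold files 3 3 (fun x hx => by
              rw [smfR_eq, if_neg (hall0 x hx), if_neg (hall1 x hx), if_neg (hall2 x hx)]) (by omega)
            omega
          rw [hm, if_neg (by omega : ¬ (3:Nat) < 3)]
          rw [← head?_filter mnvOk files]
          have hfeq : files.filter (fun f => !(PySem.Str.isIn "mnv" (PySem.Str.lower f))) = files.filter mnvOk := rfl
          rw [hfeq]
          rcases h3 : files.filter mnvOk with _ | ⟨g3, r3⟩ <;> simp only [h3] <;> rfl

-- ===== VERDICT (by name: the statement is the Claim_ definition above) =====
theorem select_mutect_file_spec : Claim_equal_select_mutect_file := by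
  intro files _
  exact select_mutect_file_key files
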